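-- pv_equiv track=rewrite | github.com/FZJ-JSC/gem5-dbc | src/g5dbc/manager/generate.py | generate_bench_id
-- ===== SOURCE A (Python) =====
-- import math
--
-- def generate_bench_id(data: list[dict]) -> list[dict]:
--     """Sort parameter list and add bench_id column
--
--     Args:
--         data (list[dict]): List of parameter iterations
--
--     Returns:
--         list[dict]: Sorted parameter iterations list with additional bench_id column
--     """
--     # sort dictionaries
--     cols = [str(k) for k in data[0].keys()]
--     rows = sorted([tuple(p[col] for col in cols) for p in data])
--     npad = math.ceil(math.log10(len(rows)))
--     cols.append("bench_id")
--     idx_data = [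
--         dict(list(zip(cols, row)))
--         for row in [(*r, str(r_id).zfill(npad)) for r_id, r in enumerate(rows)]
--     ]
--
--     return idx_data
-- ===== SOURCE B (Python) =====
-- import math
--
-- def generate_bench_id(data: list[dict]) -> list[dict]:
--     """Sort parameter list and add bench_id column (hand-written stable merge sort on the records)."""
--     cols = [str(k) for k in data[0].keys()]
--     npad = math.ceil(math.log10(len(data)))
--
--     def key(p):
--         return [p[c] for c in cols]
--
--     def merge(xs, ys):
--         i, j, out = 0, 0, []
--         while i < len(xs) and j < len(ys):
--             if key(ys[j]) < key(xs[i]):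
--                 out.append(ys[j]); j += 1
--             else:
--                 out.append(xs[i]); i += 1
--         return out + xs[i:] + ys[j:]
--
--     def msort(xs):
--         if len(xs) <= 1:
--             return xs
--         mid = len(xs) // 2
--         return merge(msort(xs[:mid]), msort(xs[mid:]))
--
--     result = []
--     for i, p in enumerate(msort(data)):
--         row = {c: p[c] for c in cols}
--         row["bench_id"] = str(i).zfill(npad)
--         result.append(row)
--     return result
-- ===== Notes on version B (the rewrite author's own statement) =====
-- stated objective: alternative
-- what changed: B sorts the records themselves with a hand-written stable top-down merge sort on the projected value list and rebuilds each output row in one enumerate loop, instead of A's library-sorting a materialised list of value-tuples and re-zipping each tuple with the column names.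
-- outside the precondition, e.g. on generate_bench_id([]): A raises IndexError, B raises IndexError; on generate_bench_id([{'a': '1'}, {'b': '2'}]): A raises KeyError, B raises KeyError
import Mathlib
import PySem

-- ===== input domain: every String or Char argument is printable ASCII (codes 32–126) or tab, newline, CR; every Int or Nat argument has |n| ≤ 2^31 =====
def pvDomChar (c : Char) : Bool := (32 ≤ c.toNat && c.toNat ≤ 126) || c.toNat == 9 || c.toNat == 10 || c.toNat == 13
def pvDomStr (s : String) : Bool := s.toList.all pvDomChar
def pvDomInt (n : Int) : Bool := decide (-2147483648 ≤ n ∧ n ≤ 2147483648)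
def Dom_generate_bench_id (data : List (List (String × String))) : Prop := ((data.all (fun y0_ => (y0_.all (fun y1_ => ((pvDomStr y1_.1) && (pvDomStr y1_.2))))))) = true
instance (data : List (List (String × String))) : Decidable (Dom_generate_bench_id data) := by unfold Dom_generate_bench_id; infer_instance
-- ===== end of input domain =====

-- B replaces A's library sort of materialised value-tuples (and their re-zip into dicts) by a
-- hand-written stable merge sort on the records themselves plus a direct row-rebuild loop
-- (objective: alternative algorithm). Return value only; neither program mutates its argument.

-- Shared helper, port of `math.ceil(math.log10(n))` for n ≥ 1 (both Pythons compute it the same way):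
-- exact integer form — 0 for n = 1, else the decimal digit count of n - 1 (checked against CPython).
def pyCeilLog10 (n : Nat) : Int := if n ≤ 1 then 0 else (Nat.log 10 (n - 1) : Int) + 1

-- ===== PORT A =====
-- data[0] on empty data raises IndexError, p[col] on a missing key raises KeyError: both are
-- excluded by Pre_generate_bench_id, so headD [] / getD "" are only evaluated where Python returns.
def generate_bench_id (data : List (List (String × String))) : List (List (String × String)) :=
  let cols : List String := (PySem.Dict.ofList (data.headD [])).keys.map (fun k => k)  -- str(k) is the identity on str keys
  let rows : List (List String) :=
    PySem.List.sorted (data.map (fun p => cols.map (fun col => (PySem.Dict.ofList p).getD col ""))) (fun r => r) false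
  let npad : Int := pyCeilLog10 rows.length
  let cols2 : List String := cols ++ ["bench_id"]
  (PySem.List.enumerate rows 0).map (fun ri =>
    (PySem.Dict.ofList (cols2.zip (ri.2 ++ [PySem.Str.zfill (PySem.Int.toStr ri.1) npad]))).items)

-- ===== PORT B =====
-- Source B's key(p) = [p[c] for c in cols]
def bKey (cols : List String) (p : List (String × String)) : List String :=
  cols.map (fun c => (PySem.Dict.ofList p).getD c "")

-- Source B's merge: the index-based while loop, transcribed as the recursion consuming the same heads
-- in the same order; the trailing `out + xs[i:] + ys[j:]` is the two list base cases. The extra Nat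
-- fuel argument only makes the recursion structural (totality guard): the port always passes enough
-- fuel (the summed lengths), so the fuel-0 fallback is never reached.
def bMerge (cols : List String) :
    Nat → List (List (String × String)) → List (List (String × String)) → List (List (String × String))
  | _, [], ys => ys
  | _, x :: xs, [] => x :: xs
  | 0, x :: xs, y :: ys => x :: xs ++ y :: ys  -- unreachable for the fuel passed below
  | f + 1, x :: xs, y :: ys =>
      if bKey cols y < bKey cols x then y :: bMerge cols f (x :: xs) ys
      else x :: bMerge cols f xs (y :: ys)

-- Source B's msort: xs[:mid] / xs[mid:] with mid = len(xs)//2 are List.take/drop (PySem.List.slice_to_natCast /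
-- slice_from_natCast); fuel (= xs.length at the top call) again only bounds the recursion depth.
def bMsort (cols : List String) :
    Nat → List (List (String × String)) → List (List (String × String))
  | 0, xs => xs
  | f + 1, xs =>
      if xs.length ≤ 1 then xs
      else bMerge cols xs.length (bMsort cols f (xs.take (xs.length / 2)))
             (bMsort cols f (xs.drop (xs.length / 2)))

def generate_bench_id_alt (data : List (List (String × String))) : List (List (String × String)) :=
  let cols : List String := (PySem.Dict.ofList (data.headD [])).keys.map (fun k => k)
  let npad : Int := pyCeilLog10 data.length
  (PySem.List.enumerate (bMsort cols data.length data) 0).map (fun ip =>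
    (((cols.foldl (fun d c => d.insert c ((PySem.Dict.ofList ip.2).getD c "")) PySem.Dict.empty)).insert
        "bench_id" (PySem.Str.zfill (PySem.Int.toStr ip.1) npad)).items)

-- ===== PRECONDITION & SPEC =====
-- Pre_ excludes exactly the inputs where A raises: empty data (IndexError on data[0]) and a later
-- dict missing one of data[0]'s keys (KeyError on p[col]).
def Pre_generate_bench_id (data : List (List (String × String))) : Prop :=
  data ≠ [] ∧ ∀ p ∈ data, ∀ c ∈ (PySem.Dict.ofList (data.headD [])).keys, (PySem.Dict.ofList p).contains c = true

instance (data : List (List (String × String))) : Decidable (Pre_generate_bench_id data) := by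
  unfold Pre_generate_bench_id; infer_instance

def pvWitness_generate_bench_id : (List (List (String × String))) := [[("a", "1"), ("b", "x")], [("a", "0"), ("b", "y")]]

def Spec_generate_bench_id (data : List (List (String × String))) (out : List (List (String × String))) : Prop := out = generate_bench_id_alt data
instance (data : List (List (String × String))) (out : List (List (String × String))) : Decidable (Spec_generate_bench_id data out) := by unfold Spec_generate_bench_id; infer_instance

-- ===== CLAIM (what is proved, stated in full; the proofs are below) =====
def Claim_equal_generate_bench_id : Prop := ∀ (data : List (List (String × String))), Dom_generate_bench_id data → Pre_generate_bench_id data → Spec_generate_bench_id data (generate_bench_id data)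

-- ===== LEMMAS AND PROOFS =====

theorem bMerge_perm (cols : List String) (f : Nat) (xs ys : List (List (String × String))) :
    (bMerge cols f xs ys).Perm (xs ++ ys) := by
  induction f generalizing xs ys with
  | zero => cases xs <;> cases ys <;> simp [bMerge]
  | succ f ih =>
      cases xs with
      | nil => simp [bMerge]
      | cons x xs =>
          cases ys with
          | nil => simp [bMerge]
          | cons y ys =>
              rw [bMerge]
              by_cases h : bKey cols y < bKey cols x
              · rw [if_pos h]
                exact (((ih (x :: xs) ys).cons y).trans (List.Perm.symm List.perm_middle))
              · rw [if_neg h]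
                exact ((ih xs (y :: ys)).cons x)

theorem bMsort_perm (cols : List String) (f : Nat) (xs : List (List (String × String))) :
    (bMsort cols f xs).Perm xs := by
  induction f generalizing xs with
  | zero => exact List.Perm.refl xs
  | succ f ih =>
      rw [bMsort]
      by_cases h : xs.length ≤ 1
      · rw [if_pos h]
      · rw [if_neg h]
        exact (bMerge_perm cols _ _ _).trans
          (((ih _).append (ih _)).trans (by rw [List.take_append_drop]))

theorem bMerge_pairwise (cols : List String) (f : Nat) (xs ys : List (List (String × String)))
    (hf : xs.length + ys.length ≤ f)
    (hx : (xs.map (bKey cols)).Pairwise (· ≤ ·)) (hy : (ys.map (bKey cols)).Pairwise (· ≤ ·)) :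
    ((bMerge cols f xs ys).map (bKey cols)).Pairwise (· ≤ ·) := by
  induction f generalizing xs ys with
  | zero =>
      have hx0 : xs = [] := List.length_eq_zero_iff.mp (by omega)
      have hy0 : ys = [] := List.length_eq_zero_iff.mp (by omega)
      subst hx0; subst hy0; simp [bMerge]
  | succ f ih =>
      cases xs with
      | nil => simpa [bMerge] using hy
      | cons x xs =>
          cases ys with
          | nil => simpa [bMerge] using hx
          | cons y ys =>
              rw [bMerge]
              by_cases h : bKey cols y < bKey cols x
              · rw [if_pos h]
                simp only [List.map_cons] at hy ⊢
                rw [List.pairwise_cons] at hy ⊢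
                refine ⟨?_, ih (x :: xs) ys (by simp at hf ⊢; omega) hx hy.2⟩
                intro b hb
                rw [List.mem_map] at hb
                obtain ⟨z, hz, rfl⟩ := hb
                have hz' := (bMerge_perm cols f (x :: xs) ys).mem_iff.mp hz
                rcases List.mem_append.mp hz' with hzx | hzy
                · rcases List.mem_cons.mp hzx with rfl | hzx
                  · exact le_of_lt h
                  · refine le_of_lt (lt_of_lt_of_le h ?_)
                    simp only [List.map_cons, List.pairwise_cons] at hx
                    exact hx.1 _ (List.mem_map_of_mem hzx)
                · exact hy.1 _ (List.mem_map_of_mem hzy)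
              · rw [if_neg h]
                simp only [List.map_cons] at hx ⊢
                rw [List.pairwise_cons] at hx ⊢
                refine ⟨?_, ih xs (y :: ys) (by simp at hf ⊢; omega) hx.2 hy⟩
                intro b hb
                rw [List.mem_map] at hb
                obtain ⟨z, hz, rfl⟩ := hb
                have hz' := (bMerge_perm cols f xs (y :: ys)).mem_iff.mp hz
                rcases List.mem_append.mp hz' with hzx | hzy
                · exact hx.1 _ (List.mem_map_of_mem hzx)
                · have hxy : bKey cols x ≤ bKey cols y := le_of_not_gt h
                  rcases List.mem_cons.mp hzy with rfl | hzy
                  · exact hxy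
                  · refine le_trans hxy ?_
                    simp only [List.map_cons, List.pairwise_cons] at hy
                    exact hy.1 _ (List.mem_map_of_mem hzy)

theorem bMsort_pairwise (cols : List String) (f : Nat) (xs : List (List (String × String)))
    (hf : xs.length ≤ f) :
    ((bMsort cols f xs).map (bKey cols)).Pairwise (· ≤ ·) := by
  induction f generalizing xs with
  | zero =>
      have hx0 : xs = [] := List.length_eq_zero_iff.mp (by omega)
      subst hx0; simp [bMsort]
  | succ f ih =>
      rw [bMsort]
      by_cases h : xs.length ≤ 1
      · rw [if_pos h]
        match xs, h with
        | [], _ => simp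
        | [a], _ => simp
      · rw [if_neg h]
        refine bMerge_pairwise cols _ _ _ ?_ (ih _ (by simp; omega)) (ih _ (by simp; omega))
        have h1 := (bMsort_perm cols f (xs.take (xs.length / 2))).length_eq
        have h2 := (bMsort_perm cols f (xs.drop (xs.length / 2))).length_eq
        simp only [List.length_take, List.length_drop] at h1 h2
        omega

-- the core fact: B's merge sort of the records, projected, IS A's library sort of the projections
theorem bMsort_map_key (cols : List String) (data : List (List (String × String))) :
    @PySem.List.sorted (List String) (List String) List.instLT (fun a b => a.decidableLT b)
        (data.map (bKey cols)) (fun r => r) false = (bMsort cols data.length data).map (bKey cols) := by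
  have hinst : (fun (a b : List String) => a.decidableLT b)
      = (LinearOrder.toDecidableLT (α := List String)) :=
    funext fun a => funext fun b => Subsingleton.elim _ _
  rw [hinst]
  exact PySem.List.sorted_id_eq_of_perm_of_pairwise _ _
    ((bMsort_perm cols data.length data).map (bKey cols)) (bMsort_pairwise cols data.length data le_rfl)

theorem enumerate_map {α β : Type} (f : α → β) (xs : List α) (s : Int) :
    PySem.List.enumerate (xs.map f) s = (PySem.List.enumerate xs s).map (fun p => (p.1, f p.2)) := by
  induction xs generalizing s with
  | nil => simp [PySem.List.enumerate_nil]
  | cons x t ih => simp [PySem.List.enumerate_cons, ih]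

-- A's dict(zip(cols + ["bench_id"], values + [id])) is B's {c: g c for c in cols} followed by row["bench_id"] = id
theorem dict_zip_eq_foldl (cols : List String) (g : String → String) (s : String) :
    PySem.Dict.ofList ((cols ++ ["bench_id"]).zip (cols.map g ++ [s]))
      = ((cols.foldl (fun d c => d.insert c (g c)) PySem.Dict.empty)).insert "bench_id" s := by
  have hzip : cols.zip (cols.map g) = cols.map (fun c => (c, g c)) := by
    simpa using (List.zip_map' (f := id) (g := g) (l := cols))
  rw [List.zip_append (by simp), hzip]
  show PySem.Dict.empty.update _ = _
  simp only [PySem.Dict.update, List.foldl_append, List.foldl_map]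
  rfl

-- ===== VERDICT (by name: the statement is the Claim_ definition above) =====
theorem generate_bench_id_spec : Claim_equal_generate_bench_id := by
  intro data _ _
  show generate_bench_id data = generate_bench_id_alt data
  simp only [generate_bench_id, generate_bench_id_alt]
  set cols : List String := (PySem.Dict.ofList (data.headD [])).keys.map (fun k => k) with hcols
  rw [show (fun p => cols.map (fun col => (PySem.Dict.ofList p).getD col "")) = bKey cols from rfl,
      bMsort_map_key cols data]
  have hlen : ((bMsort cols data.length data).map (bKey cols)).length = data.length := by
    simp [(bMsort_perm cols data.length data).length_eq]
  rw [hlen, enumerate_map, List.map_map]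
  apply List.map_congr_left
  intro ip _
  simp only [Function.comp_apply, bKey]
  rw [dict_zip_eq_foldl cols (fun c => (PySem.Dict.ofList ip.2).getD c "")
        (PySem.Str.zfill (PySem.Int.toStr ip.1) (pyCeilLog10 data.length))]
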